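-- pv_equiv track=rewrite | github.com/mszarifkar/paper2agent-cursor | tools/code_postprocessor.py | sort_imports
-- ===== SOURCE A (Python) =====
-- def sort_imports(code: str) -> str:
--     """
--     Sort imports alphabetically within import groups.
--     """
--     lines = code.split('\n')
--     import_lines = []
--     other_lines = []
--     in_imports = False
--     import_group = []
--
--     for line in lines:
--         stripped = line.strip()
--         # Check if this is an import line
--         if stripped.startswith('import ') or stripped.startswith('from '):
--             if not in_imports:
--                 in_imports = True
--             import_group.append(line)
--         else:
--             if in_imports and import_group:
--                 # Sort the import group
--                 import_group.sort()
--                 import_lines.extend(import_group)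
--                 import_lines.append('')  # Add blank line after imports
--                 import_group = []
--                 in_imports = False
--             other_lines.append(line)
--
--     # Handle remaining imports at end
--     if import_group:
--         import_group.sort()
--         import_lines.extend(import_group)
--
--     # Combine: imports first, then other code
--     result = '\n'.join(import_lines + other_lines)
--     return result
-- ===== SOURCE B (Python) =====
-- def _is_import(line):
--     s = line.strip()
--     return s.startswith('import ') or s.startswith('from ')
--
--
-- def sort_imports(code: str) -> str:
--     """
--     Sort imports alphabetically within import groups.
--
--     Two-pass: first segment the lines into maximal runs of import /
--     non-import lines, then emit sorted import runs (blank line after every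
--     import run except the final run) followed by the other lines.
--     """
--     lines = code.split('\n')
--     # Pass 1: segmentation into maximal homogeneous runs.
--     runs = []
--     for line in lines:
--         flag = _is_import(line)
--         if runs and runs[-1][0] == flag:
--             runs[-1][1].append(line)
--         else:
--             runs.append((flag, [line]))
--     # Pass 2: emit.  runs is never empty (split yields at least one line).
--     last_flag, last_group = runs[-1]
--     imports, others = [], []
--     for flag, group in runs[:-1]:
--         if flag:
--             imports.extend(sorted(group))
--             imports.append('')
--         else:
--             others.extend(group)
--     if last_flag:
--         imports.extend(sorted(last_group))
--     else:
--         others.extend(last_group)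
--     return '\n'.join(imports + others)
-- ===== Notes on version B (the rewrite author's own statement) =====
-- stated objective: alternative
-- what changed: Replaced A's single-pass flush-on-transition state machine (in_imports flag, pending import_group flushed when a non-import line arrives, leftover group handled after the loop) by a two-pass segment-then-emit structure: first group the lines into maximal import/non-import runs, then emit sorted import runs (blank line after each except the last run) and the other lines.
import Mathlib
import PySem

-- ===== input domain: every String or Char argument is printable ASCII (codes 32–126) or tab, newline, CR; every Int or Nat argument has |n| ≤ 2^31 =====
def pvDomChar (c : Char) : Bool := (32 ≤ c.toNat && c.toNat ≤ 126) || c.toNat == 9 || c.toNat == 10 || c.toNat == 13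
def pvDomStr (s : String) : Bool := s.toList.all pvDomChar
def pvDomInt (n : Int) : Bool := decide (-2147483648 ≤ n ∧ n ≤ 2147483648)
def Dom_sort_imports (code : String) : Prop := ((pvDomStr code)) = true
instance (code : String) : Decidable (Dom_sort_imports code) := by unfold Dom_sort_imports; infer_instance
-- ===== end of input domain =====

-- B replaces A's single-pass flush-on-transition state machine by a two-pass
-- segment-then-emit structure (maximal import/non-import runs, then emission);
-- same cost, alternative decomposition.

-- ===== PORT A =====
-- one loop step of A: state (import_lines, other_lines, in_imports, import_group)
def pvStepA (st : List String × List String × Bool × List String) (line : String) :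
    List String × List String × Bool × List String :=
  let (importLines, otherLines, inImports, importGroup) := st
  let stripped := PySem.Str.strip line
  if PySem.Str.startswith stripped "import " || PySem.Str.startswith stripped "from " then
    (importLines, otherLines, true, importGroup ++ [line])
  else
    if inImports && !importGroup.isEmpty then
      (importLines ++ PySem.List.sorted importGroup (fun s => s) false ++ [""],
       otherLines ++ [line], false, [])
    else
      (importLines, otherLines ++ [line], inImports, importGroup)

def sort_imports (code : String) : String :=
  let lines := (PySem.Str.split? code "\n").getD []
  let st := lines.foldl pvStepA ([], [], false, [])
  let importLines := st.1
  let otherLines := st.2.1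
  let importGroup := st.2.2.2
  let importLines :=
    if !importGroup.isEmpty then importLines ++ PySem.List.sorted importGroup (fun s => s) false
    else importLines
  PySem.Str.join "\n" (importLines ++ otherLines)

-- ===== PORT B =====
def pvIsImport (line : String) : Bool :=
  let s := PySem.Str.strip line
  PySem.Str.startswith s "import " || PySem.Str.startswith s "from "

-- pass 1 step: append line to the last run if its flag matches, else start a new run
def pvStepRun (runs : List (Bool × List String)) (line : String) : List (Bool × List String) :=
  let flag := pvIsImport line
  match runs.getLast? with
  | some (b, g) =>
      if b == flag then runs.dropLast ++ [(b, g ++ [line])] else runs ++ [(flag, [line])]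
  | none => [(flag, [line])]

-- pass 2 step for the non-final runs
def pvEmitStep (acc : List String × List String) (r : Bool × List String) :
    List String × List String :=
  if r.1 then (acc.1 ++ PySem.List.sorted r.2 (fun s => s) false ++ [""], acc.2)
  else (acc.1, acc.2 ++ r.2)

def sort_imports_alt (code : String) : String :=
  let lines := (PySem.Str.split? code "\n").getD []
  let runs := lines.foldl pvStepRun []
  match runs.getLast? with
  | none => ""   -- unreachable: split always yields at least one line
  | some (lastFlag, lastGroup) =>
    let acc := runs.dropLast.foldl pvEmitStep ([], [])
    let acc :=
      if lastFlag then (acc.1 ++ PySem.List.sorted lastGroup (fun s => s) false, acc.2)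
      else (acc.1, acc.2 ++ lastGroup)
    PySem.Str.join "\n" (acc.1 ++ acc.2)

-- ===== PRECONDITION & SPEC =====
def Spec_sort_imports (code : String) (out : String) : Prop := out = sort_imports_alt code
instance (code : String) (out : String) : Decidable (Spec_sort_imports code out) := by unfold Spec_sort_imports; infer_instance

-- ===== CLAIM (what is proved, stated in full; the proofs are below) =====
def Claim_equal_sort_imports : Prop := ∀ (code : String), Dom_sort_imports code → Spec_sort_imports code (sort_imports code)

-- ===== LEMMAS AND PROOFS =====

-- canonical recursive description shared by both proofs
def pvC (grp : List String) : List String → List String × List String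
  | [] => ((if grp.isEmpty then [] else PySem.List.sorted grp (fun s => s) false), [])
  | l :: ls =>
    if pvIsImport l then pvC (grp ++ [l]) ls
    else
      let p := pvC [] ls
      ((if grp.isEmpty then [] else PySem.List.sorted grp (fun s => s) false ++ [""]) ++ p.1,
       l :: p.2)

-- recursive groupby
def pvRuns : List String → List (Bool × List String)
  | [] => []
  | l :: ls =>
    match pvRuns ls with
    | (b, g) :: rest =>
        if pvIsImport l == b then (b, l :: g) :: rest
        else (pvIsImport l, [l]) :: (b, g) :: rest
    | [] => [(pvIsImport l, [l])]

def pvE (runs : List (Bool × List String)) : List String × List String :=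
  match runs.getLast? with
  | none => ([], [])
  | some (lastFlag, lastGroup) =>
    let acc := runs.dropLast.foldl pvEmitStep ([], [])
    if lastFlag then (acc.1 ++ PySem.List.sorted lastGroup (fun s => s) false, acc.2)
    else (acc.1, acc.2 ++ lastGroup)

def pvPrep (grp : List String) (r : List (Bool × List String)) : List (Bool × List String) :=
  if grp.isEmpty then r
  else
    match r with
    | (true, g) :: rest => (true, grp ++ g) :: rest
    | _ => (true, grp) :: r

theorem pvEmitStep_shift (i o : List String) (r : Bool × List String) :
    pvEmitStep (i, o) r = (i ++ (pvEmitStep ([], []) r).1, o ++ (pvEmitStep ([], []) r).2) := by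
  simp only [pvEmitStep]
  split <;> simp

theorem pvEmit_shift (rs : List (Bool × List String)) :
    ∀ i o, rs.foldl pvEmitStep (i, o) =
      (i ++ (rs.foldl pvEmitStep ([], [])).1, o ++ (rs.foldl pvEmitStep ([], [])).2) := by
  induction rs with
  | nil => intro i o; simp
  | cons r rs ih =>
    intro i o
    simp only [List.foldl_cons]
    rw [pvEmitStep_shift, ih ((pvEmitStep ([], []) r).1) ((pvEmitStep ([], []) r).2),
        ih (i ++ (pvEmitStep ([], []) r).1) (o ++ (pvEmitStep ([], []) r).2)]
    simp

theorem pvE_single (b : Bool) (g : List String) :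
    pvE [(b, g)] = if b then (PySem.List.sorted g (fun s => s) false, []) else ([], g) := by
  simp only [pvE, List.getLast?_singleton, List.dropLast_singleton, List.foldl_nil]
  split <;> simp

theorem pvE_cons (b : Bool) (g : List String) (rest : List (Bool × List String))
    (h : rest ≠ []) :
    pvE ((b, g) :: rest) =
      if b then ((PySem.List.sorted g (fun s => s) false ++ [""]) ++ (pvE rest).1, (pvE rest).2)
      else ((pvE rest).1, g ++ (pvE rest).2) := by
  rcases rest with _ | ⟨r', rs'⟩
  · exact absurd rfl h
  rcases hq : (r' :: rs').getLast? with _ | ⟨lb, lg⟩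
  · simp at hq
  simp only [pvE, List.getLast?_cons_cons, hq, List.dropLast_cons₂, List.foldl_cons]
  rw [pvEmit_shift]
  simp only [pvEmitStep]
  rcases lb <;> rcases b <;> simp

theorem pvStepRun_cons (b : Bool) (g : List String) (rest : List (Bool × List String))
    (h : rest ≠ []) (l : String) :
    pvStepRun ((b, g) :: rest) l = (b, g) :: pvStepRun rest l := by
  rcases rest with _ | ⟨r', rs'⟩
  · exact absurd rfl h
  rcases hq : (r' :: rs').getLast? with _ | ⟨lb, lg⟩
  · simp at hq
  simp only [pvStepRun, List.getLast?_cons_cons, hq, List.dropLast_cons₂]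
  split <;> simp

theorem pvRuns_ne_nil (l : String) (ls : List String) : pvRuns (l :: ls) ≠ [] := by
  unfold pvRuns
  rcases pvRuns ls with _ | ⟨⟨b, g⟩, rest⟩ <;> simp <;> split <;> simp

theorem pvStepRun_singleton (b : Bool) (g : List String) (l : String) :
    pvStepRun [(b, g)] l =
      if b = pvIsImport l then [(b, g ++ [l])] else [(b, g), (pvIsImport l, [l])] := by
  simp [pvStepRun]

theorem pvRuns_append (p : List String) (l : String) :
    pvRuns (p ++ [l]) = pvStepRun (pvRuns p) l := by
  induction p with
  | nil => simp [pvRuns, pvStepRun]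
  | cons x p' ih =>
    rcases hr : pvRuns p' with _ | ⟨⟨b, g⟩, r⟩
    · simp only [List.cons_append]
      unfold pvRuns
      rw [ih, hr]
      simp only [pvStepRun, List.getLast?_nil, List.getLast?_singleton,
        List.dropLast_singleton, List.nil_append]
      by_cases hb : pvIsImport x = pvIsImport l <;> simp [hb]
    · rcases r with _ | ⟨r1, rs⟩
      · simp only [List.cons_append]
        unfold pvRuns
        rw [ih, hr, pvStepRun_singleton]
        rcases hb1 : pvIsImport x <;> rcases hb2 : b <;> rcases hb3 : pvIsImport l <;>
          simp [pvStepRun, hb3]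
      · have hne : (r1 :: rs) ≠ ([] : List (Bool × List String)) := by simp
        simp only [List.cons_append]
        unfold pvRuns
        rw [ih, hr, pvStepRun_cons b g (r1 :: rs) hne l]
        by_cases hxb : pvIsImport x = b <;>
          simp [hxb, pvStepRun_cons, hne]

theorem pvFoldRuns (ls : List String) :
    ∀ p, ls.foldl pvStepRun (pvRuns p) = pvRuns (p ++ ls) := by
  induction ls with
  | nil => intro p; simp
  | cons l ls ih =>
    intro p
    simp only [List.foldl_cons]
    rw [← pvRuns_append, ih (p ++ [l])]
    simp

theorem pvE_nonimp (l : String) (ls : List String) (h : pvIsImport l = false) :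
    pvE (pvRuns (l :: ls)) = ((pvE (pvRuns ls)).1, l :: (pvE (pvRuns ls)).2) := by
  rcases hr : pvRuns ls with _ | ⟨⟨b, g⟩, r⟩
  · simp [pvRuns, hr, h, pvE]
  · rcases b with _ | _
    · rcases r with _ | ⟨r1, rs⟩
      · simp [pvRuns, hr, h, pvE_single]
      · have hne : (r1 :: rs) ≠ ([] : List (Bool × List String)) := by simp
        simp [pvRuns, hr, h, pvE_cons _ _ _ hne]
    · have hne : ((true, g) :: r) ≠ ([] : List (Bool × List String)) := by simp
      simp [pvRuns, hr, h, pvE_cons _ _ _ hne]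

theorem pvPrep_imp (grp : List String) (l : String) (ls : List String)
    (h : pvIsImport l = true) :
    pvPrep grp (pvRuns (l :: ls)) = pvPrep (grp ++ [l]) (pvRuns ls) := by
  rcases hr : pvRuns ls with _ | ⟨⟨b, g⟩, r⟩
  · rcases grp with _ | ⟨g0, gs⟩ <;> simp [pvRuns, pvPrep, hr, h]
  · rcases b <;> rcases grp with _ | ⟨g0, gs⟩ <;> simp [pvRuns, pvPrep, hr, h]

theorem pvPrep_nonimp (grp : List String) (l : String) (ls : List String)
    (h : pvIsImport l = false) :
    pvPrep grp (pvRuns (l :: ls)) =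
      if grp.isEmpty then pvRuns (l :: ls) else (true, grp) :: pvRuns (l :: ls) := by
  rcases hr : pvRuns ls with _ | ⟨⟨b, g⟩, r⟩
  · simp [pvRuns, pvPrep, hr, h]
  · rcases b <;> simp [pvRuns, pvPrep, hr, h]

theorem pvE_prep_runs (ls : List String) :
    ∀ grp, pvE (pvPrep grp (pvRuns ls)) = pvC grp ls := by
  induction ls with
  | nil =>
    intro grp
    rcases grp with _ | ⟨g0, gs⟩
    · simp [pvRuns, pvPrep, pvE, pvC]
    · simp [pvRuns, pvPrep, pvC, pvE_single]
  | cons l ls ih =>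
    intro grp
    by_cases hi : pvIsImport l = true
    · rw [pvPrep_imp grp l ls hi, ih (grp ++ [l])]
      simp [pvC, hi]
    · have hi' : pvIsImport l = false := by simpa using hi
      rw [pvPrep_nonimp grp l ls hi']
      rcases hg : grp with _ | ⟨g0, gs⟩
      · rw [List.isEmpty_nil, if_pos rfl, pvE_nonimp l ls hi']
        have := ih []
        simp [pvPrep] at this
        simp [pvC, hi', this]
      · rw [show ((g0 :: gs).isEmpty) = false from rfl, if_neg (by simp),
          pvE_cons true (g0 :: gs) _ (pvRuns_ne_nil l ls), pvE_nonimp l ls hi']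
        have := ih []
        simp [pvPrep] at this
        simp [pvC, hi', this]

def pvFinishA (st : List String × List String × Bool × List String) : List String :=
  (if !st.2.2.2.isEmpty then st.1 ++ PySem.List.sorted st.2.2.2 (fun s => s) false
   else st.1) ++ st.2.1

theorem pvA_loop (ls : List String) :
    ∀ imps oths grp,
      pvFinishA (ls.foldl pvStepA (imps, oths, !grp.isEmpty, grp)) =
        imps ++ (pvC grp ls).1 ++ (oths ++ (pvC grp ls).2) := by
  induction ls with
  | nil =>
    intro imps oths grp
    rcases grp with _ | ⟨g0, gs⟩ <;> simp [pvFinishA, pvC]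
  | cons l ls ih =>
    intro imps oths grp
    simp only [List.foldl_cons]
    by_cases hi : pvIsImport l = true
    · have h2 := hi
      simp only [pvIsImport] at h2
      have hstep : pvStepA (imps, oths, !grp.isEmpty, grp) l = (imps, oths, true, grp ++ [l]) := by
        simp only [pvStepA]
        rw [if_pos h2]
      rw [hstep]
      have hb : (true : Bool) = !(grp ++ [l]).isEmpty := by simp
      rw [hb, ih imps oths (grp ++ [l])]
      simp [pvC, hi]
    · have hi' : pvIsImport l = false := by simpa using hi
      have h2 := hi'
      simp only [pvIsImport] at h2
      rcases grp with _ | ⟨g0, gs⟩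
      · have hstep : pvStepA (imps, oths, !(List.isEmpty ([] : List String)), []) l =
            (imps, oths ++ [l], !(List.isEmpty ([] : List String)), []) := by
          simp only [pvStepA]
          rw [if_neg (by exact ne_true_of_eq_false h2)]
          simp
        rw [hstep, ih imps (oths ++ [l]) []]
        simp [pvC, hi']
      · have hstep : pvStepA (imps, oths, !((g0 :: gs).isEmpty), g0 :: gs) l =
            (imps ++ PySem.List.sorted (g0 :: gs) (fun s => s) false ++ [""],
             oths ++ [l], false, []) := by
          simp only [pvStepA]
          rw [if_neg (by exact ne_true_of_eq_false h2)]
          simp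
        have hih := ih (imps ++ PySem.List.sorted (g0 :: gs) (fun s => s) false ++ [""])
          (oths ++ [l]) []
        rw [show (!(List.isEmpty ([] : List String))) = false from rfl] at hih
        rw [hstep, hih]
        simp [pvC, hi']

theorem sort_imports_eq_join (code : String) :
    sort_imports code =
      PySem.Str.join "\n"
        ((pvC [] ((PySem.Str.split? code "\n").getD [])).1 ++
         (pvC [] ((PySem.Str.split? code "\n").getD [])).2) := by
  have h := pvA_loop ((PySem.Str.split? code "\n").getD []) [] [] []
  rw [show (!(List.isEmpty ([] : List String))) = false from rfl] at h
  have hA : sort_imports code =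
      PySem.Str.join "\n"
        (pvFinishA (List.foldl pvStepA ([], [], false, [])
          ((PySem.Str.split? code "\n").getD []))) := rfl
  rw [hA, h]
  simp

theorem sort_imports_alt_eq_join (code : String) :
    sort_imports_alt code =
      PySem.Str.join "\n"
        ((pvE (pvRuns ((PySem.Str.split? code "\n").getD []))).1 ++
         (pvE (pvRuns ((PySem.Str.split? code "\n").getD []))).2) := by
  have hruns : List.foldl pvStepRun [] ((PySem.Str.split? code "\n").getD []) =
      pvRuns ((PySem.Str.split? code "\n").getD []) := by
    simpa [pvRuns] using pvFoldRuns ((PySem.Str.split? code "\n").getD []) []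
  simp only [sort_imports_alt]
  rw [hruns]
  rcases hq : (pvRuns ((PySem.Str.split? code "\n").getD [])).getLast? with _ | ⟨lb, lg⟩
  · have hnil : pvRuns ((PySem.Str.split? code "\n").getD []) = [] := by
      simpa using hq
    simp [hnil, pvE, PySem.Str.join]
  · simp only [hq, pvE]

-- ===== VERDICT (by name: the statement is the Claim_ definition above) =====
theorem sort_imports_spec : Claim_equal_sort_imports := by
  intro code _
  unfold Spec_sort_imports
  rw [sort_imports_eq_join, sort_imports_alt_eq_join]
  have h := pvE_prep_runs ((PySem.Str.split? code "\n").getD []) []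
  simp only [pvPrep, List.isEmpty_nil, if_true] at h
  rw [h]
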